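-- pv_equiv track=rewrite | github.com/PriyankaKhire/ProgrammingPracticePython | Minimum Remove to Make Valid Parentheses pt2.py | stackApproach
-- ===== SOURCE A (Python) =====
-- def stackApproach(s):
--     extraParenthesis = []
--     stack = []
--     for i in range(len(s)):
--         if (s[i] == "("):
--             stack.append(i)
--         if (s[i] == ")"):
--             if not stack:
--                 extraParenthesis.append(i)
--             else:
--                 stack.pop()
--     return stack+extraParenthesis
-- ===== SOURCE B (Python) =====
-- def stackApproach(s):
--     n = len(s)
--     depth = 0
--     closeBad = []
--     for i in range(n):
--         if s[i] == "(":
--             depth += 1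
--         elif s[i] == ")":
--             if depth == 0:
--                 closeBad.append(i)
--             else:
--                 depth -= 1
--     cdepth = 0
--     openBad = []
--     for i in range(n - 1, -1, -1):
--         if s[i] == ")":
--             cdepth += 1
--         elif s[i] == "(":
--             if cdepth == 0:
--                 openBad.append(i)
--             else:
--                 cdepth -= 1
--     openBad.reverse()
--     return openBad + closeBad
-- ===== Notes on version B (the rewrite author's own statement) =====
-- stated objective: alternative
-- what changed: Replaces the explicit index stack with two counter passes: a forward pass with an open-depth counter collects indices of unmatched closers, a backward pass with a close-depth counter collects indices of unmatched openers (reversed to increasing order), concatenated openers-then-closers.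
import Mathlib
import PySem

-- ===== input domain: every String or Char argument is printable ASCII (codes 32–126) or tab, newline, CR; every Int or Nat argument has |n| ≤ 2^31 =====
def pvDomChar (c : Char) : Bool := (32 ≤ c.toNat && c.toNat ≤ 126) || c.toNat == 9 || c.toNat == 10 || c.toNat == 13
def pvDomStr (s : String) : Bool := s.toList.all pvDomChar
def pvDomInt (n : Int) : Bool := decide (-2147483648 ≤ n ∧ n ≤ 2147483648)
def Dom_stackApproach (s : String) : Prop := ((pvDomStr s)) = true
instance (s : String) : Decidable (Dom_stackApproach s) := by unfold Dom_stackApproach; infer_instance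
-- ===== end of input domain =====

-- B replaces A's explicit index stack with two counter passes (forward for extra ')' indices,
-- backward for extra '(' indices); alternative decomposition, same O(n) cost.


-- ===== PORT A =====
-- one loop iteration of A: append '(' index to the stack; for ')' either record the
-- index as extra (empty stack) or pop the top of the stack
def astep (p : List Int × List Int) (ic : Int × Char) : List Int × List Int :=
  let p1 := if ic.2 = '(' then (p.1 ++ [ic.1], p.2) else p
  if ic.2 = ')' then
    (if p1.1 = [] then (p1.1, p1.2 ++ [ic.1]) else (p1.1.dropLast, p1.2))
  else p1

def stackApproach (s : String) : List Int :=
  let r := (PySem.List.enumerate s.toList 0).foldl astep ([], [])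
  r.1 ++ r.2

-- ===== PORT B =====
-- forward pass of B: open-depth counter, collect unmatched ')' indices
def fstep (p : Int × List Int) (ic : Int × Char) : Int × List Int :=
  if ic.2 = '(' then (p.1 + 1, p.2)
  else if ic.2 = ')' then
    (if p.1 = 0 then (p.1, p.2 ++ [ic.1]) else (p.1 - 1, p.2))
  else p

-- backward pass of B: close-depth counter, collect unmatched '(' indices
def bstep (p : Int × List Int) (ic : Int × Char) : Int × List Int :=
  if ic.2 = ')' then (p.1 + 1, p.2)
  else if ic.2 = '(' then
    (if p.1 = 0 then (p.1, p.2 ++ [ic.1]) else (p.1 - 1, p.2))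
  else p

def stackApproach_alt (s : String) : List Int :=
  let f := (PySem.List.enumerate s.toList 0).foldl fstep (0, [])
  let g := ((PySem.List.enumerate s.toList 0).reverse).foldl bstep (0, [])
  g.2.reverse ++ f.2

-- ===== PRECONDITION & SPEC =====
def Spec_stackApproach (s : String) (out : List Int) : Prop := out = stackApproach_alt s
instance (s : String) (out : List Int) : Decidable (Spec_stackApproach s out) := by unfold Spec_stackApproach; infer_instance

-- ===== CLAIM (what is proved, stated in full; the proofs are below) =====
def Claim_equal_stackApproach : Prop := ∀ (s : String), Dom_stackApproach s → Spec_stackApproach s (stackApproach s)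

-- ===== LEMMAS AND PROOFS =====

-- forward invariant: B's depth is the length of A's stack and B's closeBad is A's extra list
lemma forward_inv (l : List (Int × Char)) :
    ∀ (st ex : List Int),
      l.foldl fstep ((st.length : Int), ex) =
        (((l.foldl astep (st, ex)).1.length : Int), (l.foldl astep (st, ex)).2) := by
  induction l with
  | nil => intro st ex; rfl
  | cons ic t ih =>
    intro st ex
    by_cases h1 : ic.2 = '('
    · have : astep (st, ex) ic = (st ++ [ic.1], ex) := by
        simp [astep, h1]
      have hf : fstep ((st.length : Int), ex) ic = (((st ++ [ic.1]).length : Int), ex) := by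
        simp [fstep, h1]
      simp only [List.foldl_cons, this, hf]
      exact ih (st ++ [ic.1]) ex
    · by_cases h2 : ic.2 = ')'
      · by_cases h3 : st = []
        · have ha : astep (st, ex) ic = (st, ex ++ [ic.1]) := by
            simp [astep, h2, h3]
          have hf : fstep ((st.length : Int), ex) ic = ((st.length : Int), ex ++ [ic.1]) := by
            simp [fstep, h2, h3]
          simp only [List.foldl_cons, ha, hf]
          exact ih st (ex ++ [ic.1])
        · have ha : astep (st, ex) ic = (st.dropLast, ex) := by
            simp [astep, h2, h3]
          have hlen : st.length ≠ 0 := by simpa [List.length_eq_zero_iff] using h3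
          have hf : fstep ((st.length : Int), ex) ic = ((st.length : Int) - 1, ex) := by
            simp [fstep, h2]
            omega
          have hcast : ((st.length : Int) - 1) = ((st.dropLast.length : Int)) := by
            simp [List.length_dropLast]; omega
          simp only [List.foldl_cons, ha, hf, hcast]
          exact ih st.dropLast ex
      · have ha : astep (st, ex) ic = (st, ex) := by
          simp [astep, h1, h2]
        have hf : fstep ((st.length : Int), ex) ic = ((st.length : Int), ex) := by
          simp [fstep, h1, h2]
        simp only [List.foldl_cons, ha, hf]
        exact ih st ex

-- backward invariant: scanning l right-to-left with cd pending closers yields, as openBad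
-- additions, the reverse of A's final stack minus its last cd elements; the counter grows
-- by the number of A's extra closers and shrinks by the opens it consumes
lemma backward_inv (l : List (Int × Char)) :
    ∀ (cd : ℕ) (ob : List Int),
      l.reverse.foldl bstep ((cd : Int), ob) =
        (((cd + (l.foldl astep ([], [])).2.length
            - min cd (l.foldl astep ([], [])).1.length : ℕ) : Int),
         ob ++ (((l.foldl astep ([], [])).1.take
            ((l.foldl astep ([], [])).1.length - cd)).reverse)) := by
  induction l using List.reverseRecOn with
  | nil => intro cd ob; simp
  | append_singleton t ic ih =>
    intro cd ob
    simp only [List.reverse_append, List.reverse_cons, List.reverse_nil, List.nil_append,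
      List.singleton_append, List.foldl_cons, List.foldl_append, List.foldl_nil]
    rcases hSE : t.foldl astep ([], []) with ⟨St, Et⟩
    simp only [hSE] at ih
    by_cases h2 : ic.2 = ')'
    · have hb : bstep ((cd : Int), ob) ic = (((cd : Int) + 1), ob) := by
        simp [bstep, h2]
      rw [hb]
      by_cases h3 : St = []
      · have ha : astep (St, Et) ic = (St, Et ++ [ic.1]) := by
          simp [astep, h2, h3]
        have hcast : ((cd : Int) + 1) = (((cd + 1 : ℕ) : Int)) := by push_cast; ring
        rw [hcast, ih (cd + 1) ob, ha, h3]
        simp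
        omega
      · have ha : astep (St, Et) ic = (St.dropLast, Et) := by
          simp [astep, h2, h3]
        have hm : 1 ≤ St.length := by
          rcases St with _ | _ <;> simp_all
        have hcast : ((cd : Int) + 1) = (((cd + 1 : ℕ) : Int)) := by push_cast; ring
        rw [hcast, ih (cd + 1) ob, ha]
        refine Prod.ext ?_ ?_
        · simp [List.length_dropLast]; omega
        · simp only [List.dropLast_eq_take, List.take_take, List.length_take]
          have hidx : min (min (St.length - 1) St.length - cd) (St.length - 1)
              = St.length - (cd + 1) := by omega
          rw [hidx]
    · by_cases h1 : ic.2 = '('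
      · have ha : astep (St, Et) ic = (St ++ [ic.1], Et) := by
          simp [astep, h1]
        rw [ha]
        by_cases h0 : cd = 0
        · have hb : bstep ((cd : Int), ob) ic = ((cd : Int), ob ++ [ic.1]) := by
            simp [bstep, h1, h0]
          rw [hb, h0]
          have := ih 0 (ob ++ [ic.1])
          simp only [Nat.cast_zero] at this ⊢
          rw [this]
          refine Prod.ext ?_ ?_
          · simp
          · rw [Nat.sub_zero, Nat.sub_zero, List.take_length, List.take_length]
            simp
        · have hcd : 1 ≤ cd := Nat.one_le_iff_ne_zero.mpr h0
          have hb : bstep ((cd : Int), ob) ic = (((cd : ℕ) : Int) - 1, ob) := by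
            simp [bstep, h1]
            omega
          have hcast : ((cd : ℕ) : Int) - 1 = (((cd - 1 : ℕ) : Int)) := by omega
          rw [hb, hcast, ih (cd - 1) ob]
          refine Prod.ext ?_ ?_
          · simp; omega
          · have hidx : St.length - (cd - 1) = St.length + 1 - cd := by omega
            have hlen : (St ++ [ic.1]).length = St.length + 1 := by simp
            rw [hidx, hlen,
              List.take_append_of_le_length (by omega : St.length + 1 - cd ≤ St.length)]
      · have ha : astep (St, Et) ic = (St, Et) := by
          simp [astep, h1, h2]
        have hb : bstep ((cd : Int), ob) ic = ((cd : Int), ob) := by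
          simp [bstep, h1, h2]
        rw [ha, hb, ih cd ob]

-- ===== VERDICT (by name: the statement is the Claim_ definition above) =====
theorem stackApproach_spec : Claim_equal_stackApproach := by
  intro s _
  unfold Spec_stackApproach stackApproach stackApproach_alt
  have h1 := forward_inv (PySem.List.enumerate s.toList 0) [] []
  have h2 := backward_inv (PySem.List.enumerate s.toList 0) 0 []
  simp only [List.length_nil, Nat.cast_zero, Nat.sub_zero, List.take_length,
    List.nil_append] at h1 h2
  simp only [h1, h2, List.reverse_reverse]
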